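-- pv_equiv track=rewrite | github.com/SC-Edwin/ds-super-crema | modules/upload_automation/google_ads.py | _category_from_ad_group_name
-- ===== SOURCE A (Python) =====
-- LANGUAGE_CODES = [
--     "en", "fr", "jp", "cn", "kr", "th", "vn", "de", "es", "pt",
--     "id", "tr", "ar", "ru", "it", "hi", "ms", "pl", "nl", "sv",
-- ]
--
-- def _category_from_ad_group_name(ag_name: str) -> str:
--     """Detect category from an ad group name."""
--     lower = ag_name.lower()
--     # Split on underscores, hyphens, AND spaces
--     # e.g., "tier1_hybrid_AI assets #2" → ["tier1", "hybrid", "ai", "assets", "#2"]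
--     parts = lower.replace("-", "_").replace(" ", "_").split("_")
--     if "ai" in parts or "eli" in parts:
--         return "AI"
--     if "influencer" in parts or "500" in parts:
--         return "influencer"
--     for code in LANGUAGE_CODES:
--         if code in parts:
--             return "localized"
--     return "normal"
-- ===== SOURCE B (Python) =====
-- LANGUAGE_CODES = [
--     "en", "fr", "jp", "cn", "kr", "th", "vn", "de", "es", "pt",
--     "id", "tr", "ar", "ru", "it", "hi", "ms", "pl", "nl", "sv",
-- ]
--
-- KEYWORD_CATEGORY = {
--     "ai": "AI", "eli": "AI",
--     "influencer": "influencer", "500": "influencer",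
--     **{code: "localized" for code in LANGUAGE_CODES},
-- }
--
-- def _category_from_ad_group_name(ag_name: str) -> str:
--     """Detect category from an ad group name."""
--     parts = ag_name.lower().replace("-", "_").replace(" ", "_").split("_")
--     found = {KEYWORD_CATEGORY[p] for p in parts if p in KEYWORD_CATEGORY}
--     for cat in ("AI", "influencer", "localized"):
--         if cat in found:
--             return cat
--     return "normal"
-- ===== Notes on version B (the rewrite author's own statement) =====
-- stated objective: idiomatic
-- what changed: Replaces the hard-coded chain of list-membership tests with a single keyword-to-category dict: one pass over the tokens collects the matched categories into a set, then the fixed priority order AI > influencer > localized picks the result.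
import Mathlib
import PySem

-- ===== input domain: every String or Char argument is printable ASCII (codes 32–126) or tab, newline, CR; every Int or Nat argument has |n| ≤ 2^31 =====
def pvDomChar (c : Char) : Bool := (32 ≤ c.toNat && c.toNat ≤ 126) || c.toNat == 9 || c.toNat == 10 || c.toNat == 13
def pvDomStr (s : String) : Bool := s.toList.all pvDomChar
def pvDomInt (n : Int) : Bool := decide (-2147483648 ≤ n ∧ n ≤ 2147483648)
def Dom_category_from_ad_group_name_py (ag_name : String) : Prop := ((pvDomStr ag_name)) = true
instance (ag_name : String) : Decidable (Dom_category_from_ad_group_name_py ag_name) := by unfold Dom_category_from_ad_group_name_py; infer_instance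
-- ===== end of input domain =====

-- B replaces A's hard-coded chain of membership tests by a keyword→category dict, one
-- collecting pass over the tokens into a set, and a priority scan (idiomatic; same cost).

-- ===== PORT A =====
def pvLANGUAGE_CODES : List (List Char) :=
  ["en".toList, "fr".toList, "jp".toList, "cn".toList, "kr".toList, "th".toList, "vn".toList,
   "de".toList, "es".toList, "pt".toList, "id".toList, "tr".toList, "ar".toList, "ru".toList,
   "it".toList, "hi".toList, "ms".toList, "pl".toList, "nl".toList, "sv".toList]

-- the 'for code in LANGUAGE_CODES' loop with its early return
def pvCodeLoop (parts : List (List Char)) : List (List Char) → String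
  | [] => "normal"
  | code :: rest => if parts.contains code then "localized" else pvCodeLoop parts rest

def category_from_ad_group_name_py (ag_name : String) : String :=
  let lower := PySem.Chars.lower ag_name.toList
  let parts := PySem.Chars.splitOn
      (PySem.Chars.replace (PySem.Chars.replace lower "-".toList "_".toList) " ".toList "_".toList)
      "_".toList
  if parts.contains "ai".toList || parts.contains "eli".toList then "AI"
  else if parts.contains "influencer".toList || parts.contains "500".toList then "influencer"
  else pvCodeLoop parts pvLANGUAGE_CODES

-- ===== PORT B =====
def pvKEYWORD_CATEGORY : PySem.Dict (List Char) String :=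
  PySem.Dict.ofList
    ([("ai".toList, "AI"), ("eli".toList, "AI"),
      ("influencer".toList, "influencer"), ("500".toList, "influencer")]
     ++ pvLANGUAGE_CODES.map (fun code => (code, "localized")))

-- the set comprehension {KEYWORD_CATEGORY[p] for p in parts if p in KEYWORD_CATEGORY}
def pvFound (parts : List (List Char)) : PySem.Set String :=
  parts.foldl
    (fun s p => match pvKEYWORD_CATEGORY.get? p with
      | some cat => PySem.Set.add s cat
      | none => s)
    PySem.Set.empty

-- the 'for cat in ("AI", "influencer", "localized")' priority loop
def pvPrioLoop (found : PySem.Set String) : List String → String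
  | [] => "normal"
  | cat :: rest => if PySem.Set.contains found cat then cat else pvPrioLoop found rest

def category_from_ad_group_name_py_alt (ag_name : String) : String :=
  let parts := PySem.Chars.splitOn
      (PySem.Chars.replace (PySem.Chars.replace (PySem.Chars.lower ag_name.toList) "-".toList "_".toList) " ".toList "_".toList)
      "_".toList
  pvPrioLoop (pvFound parts) ["AI", "influencer", "localized"]

-- ===== PRECONDITION & SPEC =====
def Spec_category_from_ad_group_name_py (ag_name : String) (out : String) : Prop := out = category_from_ad_group_name_py_alt ag_name
instance (ag_name : String) (out : String) : Decidable (Spec_category_from_ad_group_name_py ag_name out) := by unfold Spec_category_from_ad_group_name_py; infer_instance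

-- ===== CLAIM (what is proved, stated in full; the proofs are below) =====
def Claim_equal_category_from_ad_group_name_py : Prop := ∀ (ag_name : String), Dom_category_from_ad_group_name_py ag_name → Spec_category_from_ad_group_name_py ag_name (category_from_ad_group_name_py ag_name)

-- ===== LEMMAS AND PROOFS =====

-- membership in the collected set = some token maps to that category
lemma mem_pvFound (parts : List (List Char)) (c : String) :
    c ∈ pvFound parts ↔ ∃ p ∈ parts, pvKEYWORD_CATEGORY.get? p = some c := by
  suffices h : ∀ (s : PySem.Set String),
      c ∈ parts.foldl
        (fun s p => match pvKEYWORD_CATEGORY.get? p with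
          | some cat => PySem.Set.add s cat
          | none => s) s
      ↔ c ∈ s ∨ ∃ p ∈ parts, pvKEYWORD_CATEGORY.get? p = some c by
    simpa [pvFound, PySem.Set.empty] using h PySem.Set.empty
  induction parts with
  | nil => simp
  | cons q qs ih =>
    intro s
    cases hq : pvKEYWORD_CATEGORY.get? q with
    | none =>
      simp only [List.foldl_cons, hq, ih, List.mem_cons]
      constructor
      · rintro (h | ⟨p, hp, hg⟩)
        · exact Or.inl h
        · exact Or.inr ⟨p, Or.inr hp, hg⟩
      · rintro (h | ⟨p, rfl | hp, hg⟩)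
        · exact Or.inl h
        · simp [hq] at hg
        · exact Or.inr ⟨p, hp, hg⟩
    | some cat =>
      simp only [List.foldl_cons, hq, ih, PySem.Set.mem_add, List.mem_cons]
      constructor
      · rintro ((h | rfl) | ⟨p, hp, hg⟩)
        · exact Or.inl h
        · exact Or.inr ⟨q, Or.inl rfl, hq⟩
        · exact Or.inr ⟨p, Or.inr hp, hg⟩
      · rintro (h | ⟨p, rfl | hp, hg⟩)
        · exact Or.inl (Or.inl h)
        · rw [hq] at hg; exact Or.inl (Or.inr (Option.some_injective _ hg).symm)
        · exact Or.inr ⟨p, hp, hg⟩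

-- the literal dict as a plain item list
lemma pvKEYWORD_items : pvKEYWORD_CATEGORY = PySem.Dict.mk
    ([("ai".toList, "AI"), ("eli".toList, "AI"),
      ("influencer".toList, "influencer"), ("500".toList, "influencer")]
     ++ pvLANGUAGE_CODES.map (fun code => (code, "localized"))) := by decide

-- the localized tail of the dict, looked up
lemma get?_map_loc (codes : List (List Char)) (p : List Char) :
    (PySem.Dict.mk (codes.map (fun c => (c, "localized")))).get? p
      = if p ∈ codes then some "localized" else none := by
  induction codes with
  | nil => simp [PySem.Dict.get?]
  | cons c cs ih =>
    simp only [List.map_cons, PySem.Dict.get?_mk_cons, ih, List.mem_cons]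
    by_cases h : c = p
    · simp [h]
    · simp [h, Ne.symm h]

-- lookup characterisation of the literal dict
lemma get?_pvKEYWORD (p : List Char) :
    pvKEYWORD_CATEGORY.get? p =
      if p = "ai".toList ∨ p = "eli".toList then some "AI"
      else if p = "influencer".toList ∨ p = "500".toList then some "influencer"
      else if p ∈ pvLANGUAGE_CODES then some "localized"
      else none := by
  rw [pvKEYWORD_items]
  simp only [List.cons_append, List.nil_append, PySem.Dict.get?_mk_cons, get?_map_loc]
  split_ifs <;> (try rcases ‹_ ∨ _› with rfl | rfl) <;> simp_all [pvLANGUAGE_CODES]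

lemma AI_mem_found (parts : List (List Char)) :
    ("AI" ∈ pvFound parts) ↔ ("ai".toList ∈ parts ∨ "eli".toList ∈ parts) := by
  rw [mem_pvFound]
  constructor
  · rintro ⟨p, hp, hget⟩
    rw [get?_pvKEYWORD] at hget
    split_ifs at hget with h1 h2 h3 <;> simp_all
    rcases h1 with rfl | rfl
    · exact Or.inl hp
    · exact Or.inr hp
  · rintro (h | h)
    · exact ⟨_, h, by rw [get?_pvKEYWORD]; simp⟩
    · exact ⟨_, h, by rw [get?_pvKEYWORD]; simp⟩

lemma inf_mem_found (parts : List (List Char)) :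
    ("influencer" ∈ pvFound parts) ↔ ("influencer".toList ∈ parts ∨ "500".toList ∈ parts) := by
  rw [mem_pvFound]
  constructor
  · rintro ⟨p, hp, hget⟩
    rw [get?_pvKEYWORD] at hget
    split_ifs at hget with h1 h2 h3 <;> simp_all
    rcases h2 with rfl | rfl
    · exact Or.inl hp
    · exact Or.inr hp
  · rintro (h | h)
    · exact ⟨_, h, by rw [get?_pvKEYWORD]; simp⟩
    · exact ⟨_, h, by rw [get?_pvKEYWORD]; simp⟩

lemma loc_mem_found (parts : List (List Char)) :
    ("localized" ∈ pvFound parts) ↔ ∃ code ∈ pvLANGUAGE_CODES, code ∈ parts := by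
  rw [mem_pvFound]
  constructor
  · rintro ⟨p, hp, hget⟩
    rw [get?_pvKEYWORD] at hget
    split_ifs at hget with h1 h2 h3 <;> simp_all
    exact ⟨p, h3, hp⟩
  · rintro ⟨code, hcode, hmem⟩
    refine ⟨code, hmem, ?_⟩
    rw [get?_pvKEYWORD]
    have h1 : ¬ (code = "ai".toList ∨ code = "eli".toList) := by
      rintro (rfl | rfl) <;> revert hcode <;> decide
    have h2 : ¬ (code = "influencer".toList ∨ code = "500".toList) := by
      rintro (rfl | rfl) <;> revert hcode <;> decide
    rw [if_neg h1, if_neg h2, if_pos hcode]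

-- A's code loop returns "localized" iff any code occurs
lemma pvCodeLoop_eq (parts : List (List Char)) (codes : List (List Char)) :
    pvCodeLoop parts codes =
      if ∃ code ∈ codes, code ∈ parts then "localized" else "normal" := by
  induction codes with
  | nil => simp [pvCodeLoop]
  | cons c cs ih =>
    simp only [pvCodeLoop, ih]
    by_cases hc : c ∈ parts
    · simp [hc]
    · simp only [List.contains_eq_mem, hc, decide_false]
      by_cases h : ∃ code ∈ cs, code ∈ parts <;> simp [h, hc]

-- the two bodies agree for every token list
lemma bodies_eq (parts : List (List Char)) :
    (if parts.contains "ai".toList || parts.contains "eli".toList then "AI"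
     else if parts.contains "influencer".toList || parts.contains "500".toList then "influencer"
     else pvCodeLoop parts pvLANGUAGE_CODES)
    = pvPrioLoop (pvFound parts) ["AI", "influencer", "localized"] := by
  simp only [pvPrioLoop, PySem.Set.contains_eq_listContains, List.contains_eq_mem,
    Bool.or_eq_true, decide_eq_true_eq, pvCodeLoop_eq, AI_mem_found, inf_mem_found,
    loc_mem_found]

-- ===== VERDICT (by name: the statement is the Claim_ definition above) =====
theorem category_from_ad_group_name_py_spec : Claim_equal_category_from_ad_group_name_py := by
  intro ag_name _
  unfold Spec_category_from_ad_group_name_py category_from_ad_group_name_py category_from_ad_group_name_py_alt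
  exact bodies_eq _
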